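-- pv_equiv track=rewrite | github.com/elice-algorithm-study/codingtest | haein/비밀지도.py | solution
-- ===== SOURCE A (Python) =====
-- def solution(n, arr1, arr2):
--     answer = []
--     arr1list = []
--     arr2list = []
--
--     for i in range(n):
--         a = arr1[i]
--         num = ""
--         if a == 1:
--             num += "1"
--         while a // 2 >= 1:
--             if a // 2 == 1:
--                 if a % 2 == 0:
--                     num += "01"
--                     a = a//2
--                 elif a % 2 == 1:
--                     num += "11"
--                     a = a//2
--                 break
--             else:
--                 num += str(a % 2)
--                 a = a // 2
--         if len(num) < n:
--             num += "0"* (n-len(num))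
--         arr1list.append(num[::-1])
--
--     # arr1list 	['01001', '10100', '11100', '10010', '01011']
--
--     for i in range(n):
--         a = arr2[i]
--         num = ""
--         if a == 1:
--             num += "1"
--         while a // 2 >= 1:
--             if a // 2 == 1:
--                 if a % 2 == 0:
--                     num += "01"
--                     a = a//2
--                 elif a % 2 == 1:
--                     num += "11"
--                     a = a//2
--                 break
--             else:
--                 num += str(a % 2)
--                 a = a // 2
--         if len(num) < n:
--             num += "0"* (n-len(num))
--         arr2list.append(num[::-1])
--
--
--     for i in range(n):
--         num = ""
--         for j in range(n):
--             if arr1list[i][j] == "0" and arr2list[i][j] == "0":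
--                 num += " "
--             else:
--                 num += "#"
--         answer.append(num)
--
--
--     return answer
-- ===== SOURCE B (Python) =====
-- def solution(n, arr1, arr2):
--     answer = []
--     for i in range(n):
--         v = arr1[i] | arr2[i]
--         answer.append(''.join('#' if v >> k & 1 else ' ' for k in range(n - 1, -1, -1)))
--     return answer
-- ===== Notes on version B (the rewrite author's own statement) =====
-- stated objective: simpler
-- what changed: Replaces A's two hand-rolled binary-conversion passes (digit-by-digit while loops building reversed strings) and a third nested per-character comparison pass with a single loop that ORs the two integers and reads each bit directly with shift-and-mask.
-- outside the precondition, e.g. on solution(1, [2], [0]): A returns ['#'], B returns [' ']; on solution(1, [-1], [0]): A returns [' '], B returns ['#']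
import Mathlib
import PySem

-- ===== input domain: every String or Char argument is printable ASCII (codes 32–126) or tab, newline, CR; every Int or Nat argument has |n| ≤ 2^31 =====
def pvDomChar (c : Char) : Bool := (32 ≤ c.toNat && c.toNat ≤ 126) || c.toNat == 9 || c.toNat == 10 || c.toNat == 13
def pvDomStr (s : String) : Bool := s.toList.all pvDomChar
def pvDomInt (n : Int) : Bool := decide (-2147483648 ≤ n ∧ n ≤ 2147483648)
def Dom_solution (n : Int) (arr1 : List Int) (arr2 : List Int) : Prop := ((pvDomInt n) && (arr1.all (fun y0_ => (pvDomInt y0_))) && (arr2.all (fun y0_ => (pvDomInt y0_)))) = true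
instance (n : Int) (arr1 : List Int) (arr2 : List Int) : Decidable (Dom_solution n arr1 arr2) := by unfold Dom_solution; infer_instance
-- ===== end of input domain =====

-- B renders each row by bitwise-ORing the two integers and reading bits with shift-and-mask,
-- replacing A's two hand-rolled binary-conversion passes and its nested per-character comparison pass (objective: simpler).


-- ===== PORT A =====
-- the while loop 'while a // 2 >= 1: …' building the LSB-first digit string
def pvBuildNum (a : Int) (num : List Char) : List Char :=
  if 1 ≤ PySem.Int.floordiv a 2 then
    if PySem.Int.floordiv a 2 = 1 then
      if PySem.Int.mod a 2 = 0 then num ++ ['0', '1']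
      else if PySem.Int.mod a 2 = 1 then num ++ ['1', '1']
      else num  -- unreachable in the loop; Python's 'break' ends the loop after the if/elif
    else pvBuildNum (PySem.Int.floordiv a 2) (num ++ (PySem.Int.toStr (a % 2)).toList)
  else num
termination_by a.toNat
decreasing_by
  simp only [PySem.Int.floordiv_eq_ediv_of_pos (by norm_num : (0:Int) < 2)] at *
  omega

-- one iteration of A's first/second loop body: build the digit string, pad, reverse
def pvRow (n : Int) (a : Int) : List Char :=
  let num0 : List Char := if a = 1 then ['1'] else []
  let num1 := pvBuildNum a num0
  let num2 := if (num1.length : Int) < n then num1 ++ List.replicate (n - (num1.length : Int)).toNat '0' else num1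
  num2.reverse

def solution (n : Int) (arr1 : List Int) (arr2 : List Int) : List String :=
  let arr1list := (PySem.List.pyRange 0 n 1).map (fun i => pvRow n (PySem.List.pyGetD arr1 i 0))
  let arr2list := (PySem.List.pyRange 0 n 1).map (fun i => pvRow n (PySem.List.pyGetD arr2 i 0))
  (PySem.List.pyRange 0 n 1).map (fun i =>
    String.ofList ((PySem.List.pyRange 0 n 1).map (fun j =>
      if PySem.List.pyGetD (PySem.List.pyGetD arr1list i []) j ' ' = '0'
         ∧ PySem.List.pyGetD (PySem.List.pyGetD arr2list i []) j ' ' = '0'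
      then ' ' else '#')))

-- ===== PORT B =====
def solution_alt (n : Int) (arr1 : List Int) (arr2 : List Int) : List String :=
  (PySem.List.pyRange 0 n 1).map (fun i =>
    let v := PySem.Int.bor (PySem.List.pyGetD arr1 i 0) (PySem.List.pyGetD arr2 i 0)
    String.ofList ((PySem.List.pyRange (n - 1) (-1) (-1)).map (fun k =>
      if PySem.Int.band (v >>> k.toNat) 1 ≠ 0 then '#' else ' ')))

-- ===== PRECONDITION & SPEC =====
-- Pre_ excludes the inputs where A raises IndexError (a list shorter than n) and the inputs with an entry
-- outside the puzzle's domain 0 ≤ arr[i] < 2^n, where A's silent truncation to the top bits (resp. its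
-- all-zero row for non-positive entries) and B's low-bit reading are both accidental, equally defensible values.
def Pre_solution (n : Int) (arr1 : List Int) (arr2 : List Int) : Prop :=
  n.toNat ≤ arr1.length ∧ n.toNat ≤ arr2.length ∧
  (∀ a ∈ arr1.take n.toNat, 0 ≤ a ∧ PySem.Int.bitLength a ≤ n.toNat) ∧
  (∀ a ∈ arr2.take n.toNat, 0 ≤ a ∧ PySem.Int.bitLength a ≤ n.toNat)
instance (n : Int) (arr1 : List Int) (arr2 : List Int) : Decidable (Pre_solution n arr1 arr2) := by
  unfold Pre_solution; infer_instance

def pvWitness_solution : Int × List Int × List Int := (2, [1, 2], [2, 3])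

def Spec_solution (n : Int) (arr1 : List Int) (arr2 : List Int) (out : List String) : Prop := out = solution_alt n arr1 arr2
instance (n : Int) (arr1 : List Int) (arr2 : List Int) (out : List String) : Decidable (Spec_solution n arr1 arr2 out) := by unfold Spec_solution; infer_instance

-- ===== CLAIM (what is proved, stated in full; the proofs are below) =====
def Claim_equal_solution : Prop := ∀ (n : Int) (arr1 : List Int) (arr2 : List Int), Dom_solution n arr1 arr2 → Pre_solution n arr1 arr2 → Spec_solution n arr1 arr2 (solution n arr1 arr2)

-- ===== LEMMAS AND PROOFS =====

-- LSB-first binary digits of a natural number (spec for A's digit-building loop)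
def pvLsb (a : Nat) : List Char :=
  if a = 0 then [] else (if a % 2 = 1 then '1' else '0') :: pvLsb (a / 2)
termination_by a
decreasing_by omega

lemma pvLsb_zero : pvLsb 0 = [] := by rw [pvLsb]; simp

lemma pvLsb_pos (a : Nat) (h : ¬ a = 0) :
    pvLsb a = (if a % 2 = 1 then '1' else '0') :: pvLsb (a / 2) := by
  rw [pvLsb, if_neg h]

lemma pvLsb_one : pvLsb 1 = ['1'] := by
  rw [pvLsb_pos 1 (by norm_num)]
  norm_num [pvLsb_zero]

lemma pvToStr_zero : (PySem.Int.toStr (0 : Int)).toList = ['0'] := by decide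

lemma pvToStr_one : (PySem.Int.toStr (1 : Int)).toList = ['1'] := by decide

set_option maxHeartbeats 800000 in
lemma pvBuildNum_eq (k : Nat) : ∀ a : Int, a.toNat ≤ k → 2 ≤ a → ∀ num : List Char,
    pvBuildNum a num = num ++ pvLsb a.toNat := by
  induction k with
  | zero => intro a ha h2 num; omega
  | succ k ih =>
    intro a ha h2 num
    have hfd : PySem.Int.floordiv a 2 = a / 2 :=
      PySem.Int.floordiv_eq_ediv_of_pos (by norm_num)
    have hm : PySem.Int.mod a 2 = a % 2 :=
      PySem.Int.mod_eq_emod_of_pos (by norm_num)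
    rw [pvBuildNum, hfd, hm, if_pos (by omega : (1:Int) ≤ a / 2)]
    by_cases hone : a / 2 = 1
    · rw [if_pos hone]
      have h1 : a.toNat / 2 = 1 := by omega
      rw [pvLsb_pos a.toNat (by omega), h1, pvLsb_one]
      rcases (by omega : a % 2 = 0 ∨ a % 2 = 1) with h | h
      · rw [if_pos h, if_neg (by omega : ¬ a.toNat % 2 = 1)]
      · rw [if_neg (by omega : ¬ a % 2 = 0), if_pos h,
            if_pos (by omega : a.toNat % 2 = 1)]
    · rw [if_neg hone]
      have hrec := ih (a / 2) (by omega) (by omega)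
        (num ++ (PySem.Int.toStr (a % 2)).toList)
      rw [hrec]
      have htn : (a / 2).toNat = a.toNat / 2 := by omega
      rw [htn, List.append_assoc]
      congr 1
      rw [pvLsb_pos a.toNat (by omega)]
      rcases (by omega : a % 2 = 0 ∨ a % 2 = 1) with h | h
      · rw [h, pvToStr_zero, if_neg (by omega : ¬ a.toNat % 2 = 1)]
        rfl
      · rw [h, pvToStr_one, if_pos (by omega : a.toNat % 2 = 1)]
        rfl

lemma pvNum_eq (a : Int) (h : 0 ≤ a) :
    pvBuildNum a (if a = 1 then ['1'] else []) = pvLsb a.toNat := by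
  by_cases h2 : 2 ≤ a
  · rw [if_neg (by omega), pvBuildNum_eq a.toNat a le_rfl h2, List.nil_append]
  · rcases (by omega : a = 0 ∨ a = 1) with rfl | rfl
    · rw [pvBuildNum, if_neg (by decide), if_neg (by decide)]
      norm_num [pvLsb_zero]
    · rw [pvBuildNum, if_neg (by decide), if_pos rfl]
      norm_num [pvLsb_one]

lemma pvPad_eq (m : Nat) : ∀ a : Nat, a < 2 ^ m →
    pvLsb a ++ List.replicate (m - (pvLsb a).length) '0'
      = (List.range m).map (fun k => if a.testBit k then '1' else '0') := by
  induction m with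
  | zero =>
    intro a ha
    have : a = 0 := by omega
    subst this
    simp [pvLsb_zero]
  | succ m ih =>
    intro a ha
    by_cases h0 : a = 0
    · subst h0
      rw [pvLsb_zero]
      simp [Nat.zero_testBit, List.map_const']
    · rw [pvLsb_pos a h0]
      have hp : 2 ^ (m + 1) = 2 ^ m * 2 := by ring
      have hih := ih (a / 2) (by omega)
      rw [List.range_succ_eq_map, List.map_cons, List.map_map, List.length_cons,
        List.cons_append]
      have hcount : m + 1 - ((pvLsb (a / 2)).length + 1) = m - (pvLsb (a / 2)).length := by
        omega
      rw [hcount]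
      congr 1
      · by_cases hb : a % 2 = 1 <;> simp [hb, Nat.testBit_zero]
      · rw [hih]
        apply List.map_congr_left
        intro k hk
        simp [Nat.testBit_add_one]

lemma pvRow_eq (n a : Int) (h0 : 0 ≤ a) (hlt : a < 2 ^ n.toNat) :
    pvRow n a = ((List.range n.toNat).map (fun k => if a.toNat.testBit k then '1' else '0')).reverse := by
  have hlt' : a.toNat < 2 ^ n.toNat := by
    zify
    rw [Int.toNat_of_nonneg h0]
    exact_mod_cast hlt
  have hpad := pvPad_eq n.toNat a.toNat hlt'
  have hlen : (pvLsb a.toNat).length ≤ n.toNat := by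
    have := congrArg List.length hpad
    simp at this
    omega
  simp only [pvRow]
  rw [pvNum_eq a h0]
  by_cases hc : (((pvLsb a.toNat).length : Nat) : Int) < n
  · rw [if_pos hc]
    have hcnt : (n - (((pvLsb a.toNat).length : Nat) : Int)).toNat
        = n.toNat - (pvLsb a.toNat).length := by omega
    rw [hcnt, hpad]
  · rw [if_neg hc]
    have hl : (pvLsb a.toNat).length = n.toNat := by omega
    rw [← hpad, hl, Nat.sub_self, List.replicate_zero, List.append_nil]

lemma pvTestBit_iff (x k : Nat) : ((x >>> k) &&& 1 ≠ 0) ↔ Nat.testBit x k := by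
  simp [Nat.testBit, Nat.and_comm]

lemma pvChar_eq (a b : Int) (ha : 0 ≤ a) (hb : 0 ≤ b) (idx : Nat) :
    (if (PySem.Int.band (PySem.Int.bor a b >>> ((idx : Nat) : Int)) 1 ≠ 0) then '#' else ' ')
      = (if ((if a.toNat.testBit idx then '1' else '0') = '0'
            ∧ (if b.toNat.testBit idx then '1' else '0') = '0') then ' ' else '#') := by
  rw [PySem.Int.bor_of_nonneg ha hb]
  have hsh : ((a.toNat ||| b.toNat : Nat) : Int) >>> ((idx : Nat) : Int)
      = (((a.toNat ||| b.toNat) >>> idx : Nat) : Int) := by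
    simp [Int.natCast_shiftRight]
  rw [hsh]
  have hband : PySem.Int.band (((a.toNat ||| b.toNat) >>> idx : Nat) : Int) 1
      = (((a.toNat ||| b.toNat) >>> idx) &&& 1 : Nat) := by
    exact_mod_cast PySem.Int.band_natCast _ 1
  rw [hband]
  have hiff : ((((a.toNat ||| b.toNat) >>> idx) &&& 1 : Nat) : Int) ≠ 0
      ↔ Nat.testBit (a.toNat ||| b.toNat) idx := by
    rw [← pvTestBit_iff]
    exact_mod_cast Iff.rfl
  simp only [hiff, Nat.testBit_or]
  by_cases hA : a.toNat.testBit idx <;> by_cases hB : b.toNat.testBit idx <;>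
    simp [hA, hB]

lemma pvBound (a : Int) (m : Nat) (h0 : 0 ≤ a) (hbl : PySem.Int.bitLength a ≤ m) :
    a < 2 ^ m := by
  have h1 : a.natAbs < 2 ^ PySem.Int.bitLength a := PySem.Int.lt_two_pow_bitLength a
  have h3 : a.natAbs < 2 ^ m := lt_of_lt_of_le h1 (Nat.pow_le_pow_right (by norm_num) hbl)
  rw [← Int.natAbs_of_nonneg h0]
  exact_mod_cast h3

set_option maxHeartbeats 800000 in
theorem solution_spec : Claim_equal_solution := by
  intro n arr1 arr2 _hd hp
  obtain ⟨hl1, hl2, hb1, hb2⟩ := hp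
  unfold Spec_solution
  simp only [solution, solution_alt]
  apply List.map_congr_left
  intro i hi
  rw [PySem.List.mem_pyRange_one] at hi
  obtain ⟨hi0, hin⟩ := hi
  rw [PySem.List.pyGetD_map_pyRange_of_nonneg (fun i => pvRow n (PySem.List.pyGetD arr1 i 0)) n i [] hi0 hin,
      PySem.List.pyGetD_map_pyRange_of_nonneg (fun i => pvRow n (PySem.List.pyGetD arr2 i 0)) n i [] hi0 hin]
  have e1 : PySem.List.pyGetD arr1 i 0 = arr1[i.toNat]'(by omega) :=
    PySem.List.pyGetD_eq_getElem arr1 0 hi0 (by omega)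
  have e2 : PySem.List.pyGetD arr2 i 0 = arr2[i.toNat]'(by omega) :=
    PySem.List.pyGetD_eq_getElem arr2 0 hi0 (by omega)
  rw [e1, e2]
  have hmem1 : arr1[i.toNat]'(by omega) ∈ arr1.take n.toNat := by
    have h' : i.toNat < (arr1.take n.toNat).length := by simp; omega
    have := List.getElem_mem h'
    simpa [List.getElem_take] using this
  have hmem2 : arr2[i.toNat]'(by omega) ∈ arr2.take n.toNat := by
    have h' : i.toNat < (arr2.take n.toNat).length := by simp; omega
    have := List.getElem_mem h'
    simpa [List.getElem_take] using this
  obtain ⟨ha0, hblA⟩ := hb1 _ hmem1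
  obtain ⟨hb0, hblB⟩ := hb2 _ hmem2
  have halt := pvBound _ _ ha0 hblA
  have hblt := pvBound _ _ hb0 hblB
  congr 1
  rw [pvRow_eq n _ ha0 halt, pvRow_eq n _ hb0 hblt,
      PySem.List.pyRange_one, PySem.List.pyRange_neg_one]
  have hni : n - 1 - (-1) = n := by ring
  have h0n : n - 0 = n := by ring
  rw [hni, h0n, List.map_map, List.map_map]
  apply List.map_congr_left
  intro j hj
  rw [List.mem_range] at hj
  dsimp only [Function.comp]
  have hget : ∀ (x : Int), PySem.List.pyGetD
      ((List.range n.toNat).map (fun k => if x.toNat.testBit k then '1' else '0')).reverse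
      ((0 : Int) + (j : Int)) ' '
      = (if x.toNat.testBit (n.toNat - 1 - j) then '1' else '0') := by
    intro x
    rw [zero_add, PySem.List.pyGetD_natCast,
      List.getD_eq_getElem _ _ (by simpa using hj), List.getElem_reverse]
    simp
  rw [hget, hget]
  have hkn : (n - 1 - (j : Int)).toNat = n.toNat - 1 - j := by omega
  rw [hkn]
  exact (pvChar_eq _ _ ha0 hb0 _).symm
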